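-- pv_equiv track=rewrite | github.com/eunhee-dev/problem-solving | 0x0b. recursion/14956번. Philosopher’s Walk/solve.py | solve
-- ===== SOURCE A (Python) =====
-- BASE_COORD = [(1, 1), (1, 2), (2, 2), (2, 1)]
--
-- def solve(n: int, m: int) -> tuple[int, int]:
--     if n == 2:
--         return BASE_COORD[m]
--
--     prev_n = n // 2
--     quadrant, remain = divmod(m, prev_n ** 2)
--     x, y = solve(prev_n, remain)
--
--     if quadrant == 0:
--         x, y = y, x
--     elif quadrant == 3:
--         x, y = prev_n - y + 1, prev_n - x + 1
--
--     shift = {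
--         0: (0, 0),
--         1: (0, prev_n),
--         2: (prev_n, prev_n),
--         3: (prev_n, 0)
--     }
--
--     dx, dy = shift[quadrant]
--     return (x + dx, y + dy)
-- ===== SOURCE B (Python) =====
-- BASE_COORD = [(1, 1), (1, 2), (2, 2), (2, 1)]
--
-- def solve(n, m):
--     # Phase 1: descend iteratively, recording (quadrant, prev_n) at each level.
--     steps = []
--     s, v = n, m
--     while s > 2:
--         prev_n = s // 2
--         quadrant, v = divmod(v, prev_n ** 2)
--         steps.append((quadrant, prev_n))
--         s = prev_n
--     x, y = BASE_COORD[v]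
--     # Phase 2: re-apply the transforms innermost-first.
--     for quadrant, prev_n in reversed(steps):
--         if quadrant == 0:
--             x, y = y, x
--         elif quadrant == 3:
--             x, y = prev_n - y + 1, prev_n - x + 1
--         dx, dy = {0: (0, 0), 1: (0, prev_n), 2: (prev_n, prev_n), 3: (prev_n, 0)}[quadrant]
--         x, y = x + dx, y + dy
--     return (x, y)
-- ===== Notes on version B (the rewrite author's own statement) =====
-- stated objective: alternative
-- what changed: Replaced the recursive quadrant descent with an explicit iterative two-phase loop: phase one descends, recording a (quadrant, prev_n) pair per level, phase two replays the swap/flip transform and shift lookup innermost-first over the reversed list of pairs.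
import Mathlib
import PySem

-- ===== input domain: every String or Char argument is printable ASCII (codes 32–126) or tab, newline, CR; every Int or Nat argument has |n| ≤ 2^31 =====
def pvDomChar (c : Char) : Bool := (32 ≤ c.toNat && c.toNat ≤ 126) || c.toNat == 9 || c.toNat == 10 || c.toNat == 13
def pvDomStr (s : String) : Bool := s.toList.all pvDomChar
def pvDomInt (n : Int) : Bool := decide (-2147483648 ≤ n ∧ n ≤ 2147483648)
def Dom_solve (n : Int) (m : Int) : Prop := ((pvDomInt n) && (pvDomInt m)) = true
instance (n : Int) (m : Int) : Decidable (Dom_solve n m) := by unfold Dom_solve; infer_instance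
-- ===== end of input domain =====

-- B re-implements the recursive Hilbert-walk coordinate computation as an explicit
-- iterative two-phase loop (descend recording (quadrant, prev_n), then re-apply the
-- transforms innermost-first); objective: alternative decomposition, same cost.

-- ===== PORT A =====
-- shared module constant BASE_COORD
def pvBaseCoord : List (Int × Int) := [(1, 1), (1, 2), (2, 2), (2, 1)]

-- literal transliteration of A's recursion; the 'n > 2' guard only makes the
-- recursion total: for n < 2 Python raises (ZeroDivisionError for n ∈ {0,1},
-- RecursionError for negative n), so the (0,0) stubs are unreachable under Pre_solve
def solve (n : Int) (m : Int) : Int × Int :=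
  if n = 2 then (PySem.List.pyGet? pvBaseCoord m).getD (0, 0)  -- IndexError ⇒ unreachable under Pre_solve
  else if _hgt : n > 2 then
    let prev_n := PySem.Int.floordiv n 2
    match PySem.Int.divmod? m (prev_n ^ 2) with
    | none => (0, 0)  -- unreachable: n > 2 forces prev_n ^ 2 > 0
    | some qr =>
      let quadrant := qr.1
      let xy := solve prev_n qr.2
      let xy' := if quadrant = 0 then (xy.2, xy.1)
                 else if quadrant = 3 then (prev_n - xy.2 + 1, prev_n - xy.1 + 1)
                 else xy
      let shift : PySem.Dict Int (Int × Int) :=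
        PySem.Dict.ofList [(0, (0, 0)), (1, (0, prev_n)), (2, (prev_n, prev_n)), (3, (prev_n, 0))]
      let d := (shift.get? quadrant).getD (0, 0)  -- shift[quadrant]: KeyError ⇒ unreachable under Pre_solve
      (xy'.1 + d.1, xy'.2 + d.2)
  else (0, 0)  -- n < 2: Python raises; unreachable under Pre_solve
termination_by n.toNat
decreasing_by
  simp only [PySem.Int.floordiv_eq_ediv_of_pos (by omega : (0:Int) < 2)]
  omega

-- ===== PORT B =====
-- phase 1: the while-loop, recording (quadrant, prev_n) at each level
def pvPhase1 (s v : Int) : List (Int × Int) × Int :=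
  if _h : s > 2 then
    let prev_n := PySem.Int.floordiv s 2
    match PySem.Int.divmod? v (prev_n ^ 2) with
    | none => ([], v)  -- unreachable: s > 2 forces prev_n ^ 2 > 0
    | some qr =>
      let pr := pvPhase1 prev_n qr.2
      ((qr.1, prev_n) :: pr.1, pr.2)
  else ([], v)
termination_by s.toNat
decreasing_by
  simp only [PySem.Int.floordiv_eq_ediv_of_pos (by omega : (0:Int) < 2)]
  omega

-- phase 2: one step of the for-loop over reversed(steps)
def pvStep (xy : Int × Int) (qp : Int × Int) : Int × Int :=
  let xy' := if qp.1 = 0 then (xy.2, xy.1)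
             else if qp.1 = 3 then (qp.2 - xy.2 + 1, qp.2 - xy.1 + 1)
             else xy
  let d := ((PySem.Dict.ofList
      [(0, ((0:Int), (0:Int))), (1, (0, qp.2)), (2, (qp.2, qp.2)), (3, (qp.2, 0))]).get? qp.1).getD
      (0, 0)  -- {...}[quadrant]: KeyError ⇒ unreachable under Pre_solve
  (xy'.1 + d.1, xy'.2 + d.2)

def solve_alt (n : Int) (m : Int) : Int × Int :=
  let pr := pvPhase1 n m
  let xy := (PySem.List.pyGet? pvBaseCoord pr.2).getD (0, 0)
  pr.1.reverse.foldl pvStep xy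

-- ===== PRECONDITION & SPEC =====
-- A returns normally exactly when the halving chain of n ends at exactly 2 and every
-- level's quadrant digit of m lies in 0..3 (at a direct call with n = 2, Python's
-- negative list indexing also accepts -4 ≤ m < 0). On ALL other inputs A raises
-- (ZeroDivisionError, RecursionError, IndexError or KeyError), so Pre_solve excludes
-- no input on which A returns a value. pvIdxOk recurses on the halving chain of s
-- itself (no size bound): it checks the SHAPE of the input, not the computation.
-- implemented by structural recursion with fuel s.toNat (derived from the input
-- itself, never a constant cap: the chain s -> s/2 -> ... shortens by at least one
-- per step, so s.toNat levels always suffice and no admitted input is excluded)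
def pvIdxOkGo : Nat -> Int -> Int -> Bool
  | 0, s, m => decide (s = 2) && decide (-4 <= m) && decide (m < 4)
  | fuel + 1, s, m =>
    if s > 2 then
      decide (0 <= m) && decide (m < 4 * (s / 2) ^ 2) && pvIdxOkGo fuel (s / 2) (m % ((s / 2) ^ 2))
    else decide (s = 2) && decide (-4 <= m) && decide (m < 4)

def pvIdxOk (s m : Int) : Bool := pvIdxOkGo s.toNat s m

def Pre_solve (n : Int) (m : Int) : Prop := pvIdxOk n m = true
instance (n : Int) (m : Int) : Decidable (Pre_solve n m) := by unfold Pre_solve; infer_instance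

def pvWitness_solve : Int × Int := (4, 7)

def Spec_solve (n : Int) (m : Int) (out : Int × Int) : Prop := out = solve_alt n m
instance (n : Int) (m : Int) (out : Int × Int) : Decidable (Spec_solve n m out) := by unfold Spec_solve; infer_instance

-- ===== CLAIM (what is proved, stated in full; the proofs are below) =====
def Claim_equal_solve : Prop := ∀ (n : Int) (m : Int), Dom_solve n m → Pre_solve n m → Spec_solve n m (solve n m)

-- ===== LEMMAS AND PROOFS =====

lemma pv_step_eq (q p : Int) (xy : Int × Int) :
    (((if q = 0 then (xy.2, xy.1)
       else if q = 3 then (p - xy.2 + 1, p - xy.1 + 1)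
       else xy).1
        + (((PySem.Dict.ofList [(0, ((0:Int), (0:Int))), (1, (0, p)), (2, (p, p)), (3, (p, 0))]).get? q).getD (0, 0)).1),
     ((if q = 0 then (xy.2, xy.1)
       else if q = 3 then (p - xy.2 + 1, p - xy.1 + 1)
       else xy).2
        + (((PySem.Dict.ofList [(0, ((0:Int), (0:Int))), (1, (0, p)), (2, (p, p)), (3, (p, 0))]).get? q).getD (0, 0)).2)) = pvStep xy (q, p) := rfl

lemma pvIdxOkGo_fuel (f1 : Nat) : ∀ (f2 : Nat) (s m : Int), s.toNat ≤ f1 → s.toNat ≤ f2 → pvIdxOkGo f1 s m = pvIdxOkGo f2 s m := by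
  induction f1 with
  | zero =>
    intro f2 s m h1 _
    have hs : ¬ s > 2 := by omega
    cases f2 with
    | zero => rfl
    | succ g => rw [pvIdxOkGo, pvIdxOkGo, if_neg hs]
  | succ f ih =>
    intro f2 s m h1 h2
    by_cases hs : s > 2
    · obtain ⟨g, rfl⟩ : ∃ g, f2 = g + 1 := ⟨f2 - 1, by omega⟩
      rw [pvIdxOkGo, pvIdxOkGo, if_pos hs, if_pos hs]
      have hh : (s / 2).toNat ≤ f ∧ (s / 2).toNat ≤ g := by omega
      rw [ih g (s / 2) (m % ((s / 2) ^ 2)) hh.1 hh.2]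
    · cases f2 with
      | zero => rw [pvIdxOkGo, pvIdxOkGo, if_neg hs]
      | succ g => rw [pvIdxOkGo, pvIdxOkGo, if_neg hs, if_neg hs]

lemma pvIdxOk_gt (s m : Int) (hs : s > 2) :
    pvIdxOk s m = (decide (0 ≤ m) && decide (m < 4 * (s / 2) ^ 2) && pvIdxOk (s / 2) (m % ((s / 2) ^ 2))) := by
  unfold pvIdxOk
  obtain ⟨f, hf⟩ : ∃ f, s.toNat = f + 1 := ⟨s.toNat - 1, by omega⟩
  rw [hf, pvIdxOkGo, if_pos hs,
    pvIdxOkGo_fuel f (s / 2).toNat (s / 2) (m % ((s / 2) ^ 2)) (by omega) le_rfl]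

lemma pvIdxOk_le (s m : Int) (hs : ¬ s > 2) :
    pvIdxOk s m = (decide (s = 2) && decide (-4 ≤ m) && decide (m < 4)) := by
  unfold pvIdxOk
  cases h : s.toNat with
  | zero => rw [pvIdxOkGo]
  | succ f => rw [pvIdxOkGo, if_neg hs]

lemma pv_main (k : Nat) (n m : Int) (hk : n.toNat ≤ k) (hm : pvIdxOk n m = true) :
    solve n m = solve_alt n m := by
  induction k generalizing n m with
  | zero =>
    exfalso
    rw [pvIdxOk_le n m (by omega)] at hm
    simp at hm
    omega
  | succ f ih =>
    by_cases hgt : n > 2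
    · rw [pvIdxOk_gt n m hgt] at hm
      simp only [Bool.and_eq_true, decide_eq_true_eq] at hm
      obtain ⟨⟨hm0, hm4⟩, hrec⟩ := hm
      have hp2 : PySem.Int.floordiv n 2 = n / 2 :=
        PySem.Int.floordiv_eq_ediv_of_pos (by omega)
      set p : Int := n / 2 with hp
      have hp1 : 1 ≤ p := by omega
      have hBpos : (0:Int) < p ^ 2 := by positivity
      have hpf : p.toNat ≤ f := by omega
      have hne2 : n ≠ 2 := by omega
      set q := PySem.Int.floordiv m (p ^ 2) with hq
      set r := PySem.Int.mod m (p ^ 2) with hr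
      have hdm : PySem.Int.divmod? m (p ^ 2) = some (q, r) := by
        rw [hq, hr]
        simp [PySem.Int.divmod?, PySem.Int.floordiv, PySem.Int.mod]
        omega
      have hrem := PySem.Int.mod_eq_emod_of_pos (a := m) hBpos
      have hih : solve p r = solve_alt p r := by
        apply ih p r hpf
        rw [hr, hrem]
        exact hrec
      rw [solve, if_neg hne2, dif_pos hgt]
      simp only [hp2, hdm, hih]
      conv_rhs => rw [solve_alt, pvPhase1, dif_pos hgt]
      simp only [hp2, hdm]
      rw [List.reverse_cons, List.foldl_append]
      simp only [List.foldl_cons, List.foldl_nil]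
      rw [← solve_alt]
      exact pv_step_eq q p (solve_alt p r)
    · rw [pvIdxOk_le n m hgt] at hm
      simp only [Bool.and_eq_true, decide_eq_true_eq] at hm
      obtain ⟨⟨hn2, _⟩, _⟩ := hm
      subst hn2
      rw [solve, solve_alt, pvPhase1]
      norm_num

-- ===== VERDICT (by name: the statement is the Claim_ definition above) =====
theorem solve_spec : Claim_equal_solve := by
  intro n m _hdom hpre
  unfold Spec_solve
  exact pv_main n.toNat n m le_rfl hpre
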